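-- pv_equiv track=rewrite | github.com/112292454/vat | vat/asr/chunked_split.py | _remove_leading_nchars
-- ===== SOURCE A (Python) =====
-- def _remove_leading_nchars(text: str, n: int) -> str:
--     """
--     从文本中移除前 n 个非空白字符，保留剩余部分（包括中间的空白）
--
--     例: _remove_leading_nchars("abc def ghi", 4) -> "ef ghi"
--     """
--     removed = 0
--     for i, ch in enumerate(text):
--         if ch.strip():  # 非空白字符
--             removed += 1
--             if removed >= n:
--                 return text[i + 1:]
--     return ""  # 所有非空白字符都被移除
-- ===== SOURCE B (Python) =====
-- def _remove_leading_nchars(text: str, n: int) -> str: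
--     # collect-then-index: indices of all non-whitespace chars in one pass,
--     # then slice after the k-th one (k = max(n,1) mirrors n<=0 behaviour)
--     idx = [i for i, ch in enumerate(text) if ch.strip()]
--     k = n if n >= 1 else 1
--     if len(idx) >= k:
--         return text[idx[k - 1] + 1:]
--     return ""
-- ===== Notes on version B (the rewrite author's own statement) =====
-- stated objective: alternative
-- what changed: Replaces the early-returning stateful scan by a collect-then-index decomposition: one comprehension gathers the indices of all non-whitespace characters, then the answer is a single slice after the k-th such index (k = max(n,1)), with '' when fewer than k exist.
import Mathlib
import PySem

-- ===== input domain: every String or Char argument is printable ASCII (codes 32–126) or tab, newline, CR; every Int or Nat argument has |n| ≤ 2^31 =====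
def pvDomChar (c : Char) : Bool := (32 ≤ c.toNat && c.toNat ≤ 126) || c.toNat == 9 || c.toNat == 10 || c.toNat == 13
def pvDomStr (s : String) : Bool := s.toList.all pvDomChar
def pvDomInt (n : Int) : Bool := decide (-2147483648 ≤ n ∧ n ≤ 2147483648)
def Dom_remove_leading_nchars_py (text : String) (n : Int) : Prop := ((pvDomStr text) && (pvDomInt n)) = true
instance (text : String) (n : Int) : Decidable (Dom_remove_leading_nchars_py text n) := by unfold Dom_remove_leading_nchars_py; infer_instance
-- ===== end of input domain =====

-- B replaces A's early-returning stateful scan by collect-then-index: gather all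
-- non-whitespace indices, then one slice after the k-th (k = max(n,1)); objective: alternative.

-- truthiness of ch.strip() for a single character (used by both Pythons' `if ch.strip():`)
def pvNonWS (ch : Char) : Bool := !(PySem.Chars.strip [ch]).isEmpty

-- ===== PORT A =====
-- the for-loop over enumerate(text) with the running `removed` counter and early return
def pvGoA (text : List Char) : List (Int × Char) → Int → Int → String
  | [], _, _ => ""
  | (i, ch) :: rest, n, removed =>
    if pvNonWS ch then
      if removed + 1 ≥ n then String.ofList (PySem.List.slice text (some (i + 1)) none)
      else pvGoA text rest n (removed + 1)
    else pvGoA text rest n removed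

def remove_leading_nchars_py (text : String) (n : Int) : String :=
  pvGoA text.toList (PySem.List.enumerate text.toList 0) n 0

-- ===== PORT B =====
def remove_leading_nchars_py_alt (text : String) (n : Int) : String :=
  let cs := text.toList
  let idx := ((PySem.List.enumerate cs 0).filter (fun p => pvNonWS p.2)).map (·.1)
  let k := if n ≥ 1 then n else 1
  if k ≤ (idx.length : Int) then
    String.ofList (PySem.List.slice cs (some (PySem.List.pyGetD idx (k - 1) 0 + 1)) none)
  else ""

-- ===== PRECONDITION & SPEC =====
def Spec_remove_leading_nchars_py (text : String) (n : Int) (out : String) : Prop := out = remove_leading_nchars_py_alt text n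
instance (text : String) (n : Int) (out : String) : Decidable (Spec_remove_leading_nchars_py text n out) := by unfold Spec_remove_leading_nchars_py; infer_instance

-- ===== CLAIM (what is proved, stated in full; the proofs are below) =====
def Claim_equal_remove_leading_nchars_py : Prop := ∀ (text : String) (n : Int), Dom_remove_leading_nchars_py text n → Spec_remove_leading_nchars_py text n (remove_leading_nchars_py text n)

-- ===== LEMMAS AND PROOFS =====

theorem pvPyGetD_cons_of_pos {α : Type} (x : α) (xs : List α) (i : Int) (d : α) (h : 1 ≤ i) :
    PySem.List.pyGetD (x :: xs) i d = PySem.List.pyGetD xs (i - 1) d := by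
  obtain ⟨m, rfl⟩ : ∃ m : Nat, i = (m : Int) + 1 := ⟨(i - 1).toNat, by omega⟩
  have h1 : ((m : Int) + 1) = ((m + 1 : Nat) : Int) := by push_cast; ring
  rw [h1]
  have h2 : (((m + 1 : Nat) : Int) - 1) = (m : Int) := by push_cast; ring
  rw [h2, PySem.List.pyGetD_natCast, PySem.List.pyGetD_natCast]
  rfl

-- A's scan equals B's "index the filtered list" expression, generalized over the
-- remaining enumerated suffix and the running counter.
theorem pvGoA_eq (text : List Char) (es : List (Int × Char)) : ∀ (n removed : Int),
    pvGoA text es n removed =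
      (if max (n - removed) 1 ≤ (((es.filter (fun p => pvNonWS p.2)).map (·.1)).length : Int) then
        String.ofList (PySem.List.slice text
          (some (PySem.List.pyGetD ((es.filter (fun p => pvNonWS p.2)).map (·.1))
            (max (n - removed) 1 - 1) 0 + 1)) none)
      else "") := by
  induction es with
  | nil =>
    intro n removed
    simp [pvGoA]
  | cons p rest ih =>
    obtain ⟨i, ch⟩ := p
    intro n removed
    by_cases h : pvNonWS ch
    · by_cases h2 : removed + 1 ≥ n
      · have hk : max (n - removed) 1 = 1 := by omega
        simp [pvGoA, h, h2, hk, PySem.List.pyGetD_zero_cons]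
      · have hk : max (n - removed) 1 = n - removed := by omega
        have hk' : max (n - (removed + 1)) 1 = n - removed - 1 := by omega
        simp [pvGoA, h, if_neg h2, ih, hk, hk',
          pvPyGetD_cons_of_pos i _ (n - removed - 1) 0 (by omega)]
    · simp [pvGoA, h, ih]

-- ===== VERDICT (by name: the statement is the Claim_ definition above) =====
theorem remove_leading_nchars_py_spec : Claim_equal_remove_leading_nchars_py := by
  intro text n _
  unfold Spec_remove_leading_nchars_py remove_leading_nchars_py remove_leading_nchars_py_alt
  rw [pvGoA_eq]
  have : max (n - 0) 1 = if n ≥ 1 then n else 1 := by omega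
  simp only [this]
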